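-- pv_equiv track=rewrite | github.com/spluto-dot/3sx | tools/analyze_xmap.py | parse_comment
-- ===== SOURCE A (Python) =====
-- def parse_comment(comment: str):
--     type = None
--     size = 0
--
--     for component in comment.split():
--         key, value = component.split(":")
--
--         if key == "type":
--             type = value
--         elif key == "size":
--             size = int(value, base=16)
--
--     return type, size
-- ===== SOURCE B (Python) =====
-- def parse_comment(comment: str):
--     # Stage 1: tokenize and validate all key:value pairs (raises ValueError on malformed tokens, like A's unpack).
--     pairs = [(k, v) for k, v in (c.split(":") for c in comment.split())]
--     # Stage 2: last occurrence wins, so search back-to-front and stop at the first match.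
--     type = next((v for k, v in reversed(pairs) if k == "type"), None)
--     size = next((int(v, base=16) for k, v in reversed(pairs) if k == "size"), 0)
--     return type, size
-- ===== Notes on version B (the rewrite author's own statement) =====
-- stated objective: alternative
-- what changed: Replaces A's single forward accumulation pass with mutable type/size state and per-key branch dispatch by a staged design: one tokenize-and-validate pass building a (key,value) list, then two independent back-to-front first-match searches (last occurrence wins) that stop early at the first hit.
import Mathlib
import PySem

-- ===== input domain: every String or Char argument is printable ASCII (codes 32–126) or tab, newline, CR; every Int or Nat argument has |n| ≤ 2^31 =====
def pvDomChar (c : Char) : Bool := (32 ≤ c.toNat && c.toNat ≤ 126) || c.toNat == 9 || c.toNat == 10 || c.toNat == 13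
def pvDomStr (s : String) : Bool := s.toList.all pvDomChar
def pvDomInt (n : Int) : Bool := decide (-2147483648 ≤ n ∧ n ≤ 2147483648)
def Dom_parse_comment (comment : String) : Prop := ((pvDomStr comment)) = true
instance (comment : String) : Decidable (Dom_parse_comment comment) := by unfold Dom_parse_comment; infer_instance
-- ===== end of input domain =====

-- B replaces A's forward accumulation loop with per-key branch dispatch by a staged design:
-- tokenize/validate into a (key,value) list, then two back-to-front first-match searches.

-- ===== PORT A =====
-- A's loop body: unpack 'key:value' (ValueError → none state) and dispatch on the key.
def pcStepA (st : Option (Option String × Int)) (comp : String) : Option (Option String × Int) :=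
  match st with
  | none => none
  | some (t, s) =>
    match PySem.Str.split? comp ":" with
    | some [k, v] =>
      if k == "type" then some (some v, s)
      else if k == "size" then
        match PySem.Int.ofStrBase? v 16 with
        | some n => some (t, n)
        | none => none          -- int(value, 16) raises ValueError
      else some (t, s)
    | _ => none                  -- unpack of key, value raises ValueError

def parse_comment (comment : String) : Option String × Int :=
  ((PySem.Str.split₀ comment).foldl pcStepA (some (none, 0))).getD (none, 0)

-- ===== PORT B =====
-- B stage 1: [(k, v) for k, v in (c.split(":") for c in comment.split())]; none = ValueError.
def pcPairs? : List String → Option (List (String × String))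
  | [] => some []
  | c :: rest =>
    match PySem.Str.split? c ":" with
    | some [k, v] => (pcPairs? rest).map (fun kvs => (k, v) :: kvs)
    | _ => none

-- B stage 2: next((v for k, v in reversed(pairs) if k == key), default) — first match from the back.
def pcLast (key : String) (kvs : List (String × String)) : Option String :=
  (kvs.reverse.find? (fun p => p.1 == key)).map Prod.snd

def parse_comment_alt (comment : String) : Option String × Int :=
  match pcPairs? (PySem.Str.split₀ comment) with
  | none => (none, 0)            -- ValueError path, excluded by Pre_
  | some kvs =>
    (pcLast "type" kvs,
     match pcLast "size" kvs with
     | some v => (PySem.Int.ofStrBase? v 16).getD 0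
     | none => 0)

-- ===== PRECONDITION & SPEC =====
-- token shape helper for Pre_: the parts of one key:value token
def pcParts (c : String) : List String := (PySem.Str.split? c ":").getD []

-- Pre_ excludes exactly the inputs where Python A raises ValueError: a whitespace token without
-- exactly one ':' (unpack fails), or a 'size' token whose value is not a valid base-16 int literal.
def Pre_parse_comment (comment : String) : Prop :=
  ∀ c ∈ PySem.Str.split₀ comment,
    (pcParts c).length = 2 ∧
    ((pcParts c)[0]! = "size" → (PySem.Int.ofStrBase? ((pcParts c)[1]!) 16).isSome = true)
instance (comment : String) : Decidable (Pre_parse_comment comment) := by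
  unfold Pre_parse_comment; infer_instance

def pvWitness_parse_comment : String := "type:a size:1f"

def Spec_parse_comment (comment : String) (out : Option String × Int) : Prop := out = parse_comment_alt comment
instance (comment : String) (out : Option String × Int) : Decidable (Spec_parse_comment comment out) := by unfold Spec_parse_comment; infer_instance

-- ===== CLAIM (what is proved, stated in full; the proofs are below) =====
def Claim_equal_parse_comment : Prop := ∀ (comment : String), Dom_parse_comment comment → Pre_parse_comment comment → Spec_parse_comment comment (parse_comment comment)

-- ===== LEMMAS AND PROOFS =====

-- the result B derives from a pair list, with explicit fallbacks for the induction
def pcLastT (kvs : List (String × String)) (t : Option String) : Option String :=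
  match pcLast "type" kvs with
  | some v => some v
  | none => t

def pcLastS (kvs : List (String × String)) (s : Int) : Int :=
  match pcLast "size" kvs with
  | some v => (PySem.Int.ofStrBase? v 16).getD 0
  | none => s

lemma pcLast_cons (key k v : String) (kvs : List (String × String)) :
    pcLast key ((k, v) :: kvs) =
      ((pcLast key kvs).orElse (fun _ => if k == key then some v else none)) := by
  unfold pcLast
  simp only [List.reverse_cons, List.find?_append]
  cases h : (kvs.reverse.find? (fun p => p.1 == key)) with
  | none => simp [List.find?]; split <;> simp_all
  | some p => simp

-- main loop invariant: A's fold from state (t, s) equals B's staged computation with fallbacks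
lemma pcMain (toks : List String) :
    ∀ (t : Option String) (s : Int),
      (∀ c ∈ toks, (pcParts c).length = 2 ∧
        ((pcParts c)[0]! = "size" → (PySem.Int.ofStrBase? ((pcParts c)[1]!) 16).isSome = true)) →
      ∃ kvs, pcPairs? toks = some kvs ∧
        (toks.foldl pcStepA (some (t, s))).getD (none, 0) = (pcLastT kvs t, pcLastS kvs s) := by
  induction toks with
  | nil =>
      intro t s _
      exact ⟨[], rfl, by simp [pcLastT, pcLastS, pcLast]⟩
  | cons c rest ih =>
      intro t s hpre
      have hc := hpre c (by simp)
      have hrest : ∀ x ∈ rest, (pcParts x).length = 2 ∧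
          ((pcParts x)[0]! = "size" → (PySem.Int.ofStrBase? ((pcParts x)[1]!) 16).isSome = true) :=
        fun x hx => hpre x (by simp [hx])
      cases hsp : PySem.Str.split? c ":" with
      | none => simp [pcParts, hsp] at hc
      | some parts =>
        have hlen : parts.length = 2 := by simpa [pcParts, hsp] using hc.1
        obtain ⟨k, v, rfl⟩ : ∃ k v, parts = [k, v] := by
          cases parts with
          | nil => simp at hlen
          | cons a tl =>
            cases tl with
            | nil => simp at hlen
            | cons b tl2 =>
              cases tl2 with
              | nil => exact ⟨a, b, rfl⟩
              | cons c3 t3 => simp at hlen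
        have hkv0 : (pcParts c)[0]! = k := by simp [pcParts, hsp]
        have hkv1 : (pcParts c)[1]! = v := by simp [pcParts, hsp]
        -- compute A's step
        have hstep : ∃ t' s',
            pcStepA (some (t, s)) c = some (t', s') ∧
            t' = (if k == "type" then some v else t) ∧
            s' = (if k == "size" then (PySem.Int.ofStrBase? v 16).getD 0 else s) := by
          by_cases hk : k = "type"
          · exact ⟨some v, s, by simp [pcStepA, hsp, hk], by simp [hk], by simp [hk]⟩
          · by_cases hk2 : k = "size"
            · obtain ⟨n, hn⟩ : ∃ n, PySem.Int.ofStrBase? v 16 = some n := by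
                have := hc.2 (by rw [hkv0, hk2])
                rw [hkv1] at this
                exact Option.isSome_iff_exists.mp this
              exact ⟨t, n, by simp [pcStepA, hsp, hk2, hn],
                by simp [hk], by simp [hk2, hn]⟩
            · exact ⟨t, s, by simp [pcStepA, hsp, hk, hk2],
                by simp [hk], by simp [hk2]⟩
        obtain ⟨t', s', hA, ht', hs'⟩ := hstep
        obtain ⟨kvs, hkvs, hfold⟩ := ih t' s' hrest
        refine ⟨(k, v) :: kvs, by simp [pcPairs?, hsp, hkvs], ?_⟩
        rw [List.foldl_cons, hA, hfold]
        have h1 : pcLastT kvs t' = pcLastT ((k, v) :: kvs) t := by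
          unfold pcLastT
          rw [pcLast_cons]
          cases h : pcLast "type" kvs with
          | some w => simp [Option.orElse]
          | none =>
            simp only [Option.orElse, ht']
            by_cases hk : k = "type" <;> simp [hk]
        have h2 : pcLastS kvs s' = pcLastS ((k, v) :: kvs) s := by
          unfold pcLastS
          rw [pcLast_cons]
          cases h : pcLast "size" kvs with
          | some w => simp [Option.orElse]
          | none =>
            simp only [Option.orElse, hs']
            by_cases hk : k = "size" <;> simp [hk]
        rw [h1, h2]

-- ===== VERDICT (by name: the statement is the Claim_ definition above) =====
theorem parse_comment_spec : Claim_equal_parse_comment := by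
  intro comment _ hpre
  unfold Spec_parse_comment
  obtain ⟨kvs, hkvs, hfold⟩ := pcMain (PySem.Str.split₀ comment) none 0 hpre
  have halt : parse_comment_alt comment = (pcLastT kvs none, pcLastS kvs 0) := by
    unfold parse_comment_alt
    rw [hkvs]
    unfold pcLastT pcLastS
    cases h1 : pcLast "type" kvs <;> cases h2 : pcLast "size" kvs <;> simp [h1, h2]
  unfold parse_comment
  rw [hfold]
  exact halt.symm
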